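-- pv_equiv track=rewrite | github.com/eitanlees/StudioPy | iea/acs2/ffts/recursive_fft.py | algorithm_text
-- ===== SOURCE A (Python) =====
-- def algorithm_text(line=[24]):
--   # Dirty way of dealing with the changing algorithm text format as we cycle through portions of it
--   # The function is called by window["-MULTI-"].update(algorithm_text()) to update the text source
--   # And window["-MULTI-"].update() is called most by self._wait_for_update_call() that allows us to control
--   # our stepping through the recursive algorithm
--   prestr = ["    " for _ in range(25)]
--   for i in line:
--     prestr[i] = "--->"
--   string  = "                                                                             \n\n"
--   string += "       <--- Recursive FFT Algorithm --->                                       \n"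
--   string += "                                                                               \n"
--   string += " 0  {0}    procedure fft( x )                                                  \n".format(prestr[0] )
--   string += " 1                                                                             \n"
--   string += " 2  {0}        n = size(x)                                                     \n".format(prestr[2] )
--   string += " 3  {0}        if n = 1 then                                                   \n".format(prestr[3] )
--   string += " 4  {0}            return x[ 0 ]                                               \n".format(prestr[4] )
--   string += " 5                                                                             \n"
--   string += " 6  {0}        else                                                            \n".format(prestr[6] )
--   string += " 7  {0}            even = x[ ::2  ]                                            \n".format(prestr[7] )
--   string += " 8  {0}            odd = x[ 1::2 ]                                             \n".format(prestr[8] )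
--   string += " 9                                                                             \n"
--   string += "10  {0}            x = fft( even )                   # FFT over even indices   \n".format(prestr[10])
--   string += "11  {0}            x += fft( odd  )                  # FFT over odd  indices   \n".format(prestr[11])
--   string += "12                                                                             \n"
--   string += "13  {0}            T = exp( ( -2 * pi * 1j ) / n )   # Twiddle factor          \n".format(prestr[13])
--   string += "14  {0}            for k1 = n // 2                                             \n".format(prestr[14])
--   string += "15  {0}                xk = x[ k1 ]                                            \n".format(prestr[15])
--   string += "16  {0}                k2 = k1 + n // 2                                        \n".format(prestr[16])
--   string += "17  {0}                x[ k1 ] = xk + x[ k2 ] * T^k1                           \n".format(prestr[17])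
--   string += "18  {0}                x[ k2 ] = xk - x[ k2 ] * T^k1                           \n".format(prestr[18])
--   string += "19  {0}            end                                                         \n".format(prestr[19])
--   string += "20  {0}        end                                                             \n".format(prestr[20])
--   string += "21                                                                             \n"
--   string += "22  {0}        return x                                                        \n".format(prestr[22])
--   string += "23  {0}    end procedure                                                       \n".format(prestr[23])
--   string += "                                                                             \n\n"
--   return string
-- ===== SOURCE B (Python) =====
-- # Table-driven rewrite: the pseudocode is one row table; a set of the requested
-- # line numbers decides each row's marker slot; rows are joined once.
-- _ROWS = [
--     (None, '                                                                             ', ''),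
--     (None, '', ''),
--     (None, '       <--- Recursive FFT Algorithm --->                                       ', ''),
--     (None, '                                                                               ', ''),
--     (0, ' 0  ', '    procedure fft( x )                                                  '),
--     (None, ' 1                                                                             ', ''),
--     (2, ' 2  ', '        n = size(x)                                                     '),
--     (3, ' 3  ', '        if n = 1 then                                                   '),
--     (4, ' 4  ', '            return x[ 0 ]                                               '),
--     (None, ' 5                                                                             ', ''),
--     (6, ' 6  ', '        else                                                            '),
--     (7, ' 7  ', '            even = x[ ::2  ]                                            '),
--     (8, ' 8  ', '            odd = x[ 1::2 ]                                             '),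
--     (None, ' 9                                                                             ', ''),
--     (10, '10  ', '            x = fft( even )                   # FFT over even indices   '),
--     (11, '11  ', '            x += fft( odd  )                  # FFT over odd  indices   '),
--     (None, '12                                                                             ', ''),
--     (13, '13  ', '            T = exp( ( -2 * pi * 1j ) / n )   # Twiddle factor          '),
--     (14, '14  ', '            for k1 = n // 2                                             '),
--     (15, '15  ', '                xk = x[ k1 ]                                            '),
--     (16, '16  ', '                k2 = k1 + n // 2                                        '),
--     (17, '17  ', '                x[ k1 ] = xk + x[ k2 ] * T^k1                           '),
--     (18, '18  ', '                x[ k2 ] = xk - x[ k2 ] * T^k1                           '),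
--     (19, '19  ', '            end                                                         '),
--     (20, '20  ', '        end                                                             '),
--     (None, '21                                                                             ', ''),
--     (22, '22  ', '        return x                                                        '),
--     (23, '23  ', '    end procedure                                                       '),
--     (None, '                                                                             ', ''),
--     (None, '', ''),
--     (None, '', ''),
-- ]
--
--
-- def algorithm_text(line=[24]):
--     marked = set(line)
--     return "\n".join(
--         before if n is None else
--         before + ("--->" if n in marked else "    ") + after
--         for n, before, after in _ROWS)
-- ===== Notes on version B (the rewrite author's own statement) =====
-- stated objective: simpler
-- what changed: A mutates a 25-slot marker array by index and concatenates 28 '+='-formatted lines; B keeps the pseudocode as one row table (line number, prefix, suffix), builds a set from `line`, formats each row by set membership and joins once.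
import Mathlib
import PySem

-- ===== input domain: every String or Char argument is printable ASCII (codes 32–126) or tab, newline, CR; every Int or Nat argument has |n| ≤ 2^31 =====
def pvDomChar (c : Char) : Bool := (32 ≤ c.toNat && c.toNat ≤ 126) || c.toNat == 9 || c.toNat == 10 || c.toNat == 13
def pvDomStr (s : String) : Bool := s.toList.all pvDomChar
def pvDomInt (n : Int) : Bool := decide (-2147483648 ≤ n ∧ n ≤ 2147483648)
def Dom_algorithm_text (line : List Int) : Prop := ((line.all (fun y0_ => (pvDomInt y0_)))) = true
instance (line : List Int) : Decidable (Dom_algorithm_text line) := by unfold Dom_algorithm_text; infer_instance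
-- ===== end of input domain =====

-- B replaces A's 25-slot marker-array mutation and 28 sequential '+='-formatted
-- appends by one row table plus a set of the requested line numbers, joined once
-- (objective: simpler); return value proved equal on Pre_.

-- ===== PORT A =====
def algorithm_text (line : List Int) : String :=
  -- prestr = ["    " for _ in range(25)]
  let prestr : List String := (PySem.List.pyRange 0 25 1).map (fun _ => "    ")
  -- for i in line: prestr[i] = "--->"   (pySetD: exact where Python does not raise; Pre_ gives InRange)
  let prestr : List String := line.foldl (fun p i => PySem.List.pySetD p i "--->") prestr
  let s : String := "                                                                             \n\n"
  let s : String := s ++ "       <--- Recursive FFT Algorithm --->                                       \n"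
  let s : String := s ++ "                                                                               \n"
  let s : String := s ++ (" 0  " ++ PySem.List.pyGetD prestr 0 "" ++ "    procedure fft( x )                                                  \n")
  let s : String := s ++ " 1                                                                             \n"
  let s : String := s ++ (" 2  " ++ PySem.List.pyGetD prestr 2 "" ++ "        n = size(x)                                                     \n")
  let s : String := s ++ (" 3  " ++ PySem.List.pyGetD prestr 3 "" ++ "        if n = 1 then                                                   \n")
  let s : String := s ++ (" 4  " ++ PySem.List.pyGetD prestr 4 "" ++ "            return x[ 0 ]                                               \n")
  let s : String := s ++ " 5                                                                             \n"
  let s : String := s ++ (" 6  " ++ PySem.List.pyGetD prestr 6 "" ++ "        else                                                            \n")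
  let s : String := s ++ (" 7  " ++ PySem.List.pyGetD prestr 7 "" ++ "            even = x[ ::2  ]                                            \n")
  let s : String := s ++ (" 8  " ++ PySem.List.pyGetD prestr 8 "" ++ "            odd = x[ 1::2 ]                                             \n")
  let s : String := s ++ " 9                                                                             \n"
  let s : String := s ++ ("10  " ++ PySem.List.pyGetD prestr 10 "" ++ "            x = fft( even )                   # FFT over even indices   \n")
  let s : String := s ++ ("11  " ++ PySem.List.pyGetD prestr 11 "" ++ "            x += fft( odd  )                  # FFT over odd  indices   \n")
  let s : String := s ++ "12                                                                             \n"
  let s : String := s ++ ("13  " ++ PySem.List.pyGetD prestr 13 "" ++ "            T = exp( ( -2 * pi * 1j ) / n )   # Twiddle factor          \n")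
  let s : String := s ++ ("14  " ++ PySem.List.pyGetD prestr 14 "" ++ "            for k1 = n // 2                                             \n")
  let s : String := s ++ ("15  " ++ PySem.List.pyGetD prestr 15 "" ++ "                xk = x[ k1 ]                                            \n")
  let s : String := s ++ ("16  " ++ PySem.List.pyGetD prestr 16 "" ++ "                k2 = k1 + n // 2                                        \n")
  let s : String := s ++ ("17  " ++ PySem.List.pyGetD prestr 17 "" ++ "                x[ k1 ] = xk + x[ k2 ] * T^k1                           \n")
  let s : String := s ++ ("18  " ++ PySem.List.pyGetD prestr 18 "" ++ "                x[ k2 ] = xk - x[ k2 ] * T^k1                           \n")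
  let s : String := s ++ ("19  " ++ PySem.List.pyGetD prestr 19 "" ++ "            end                                                         \n")
  let s : String := s ++ ("20  " ++ PySem.List.pyGetD prestr 20 "" ++ "        end                                                             \n")
  let s : String := s ++ "21                                                                             \n"
  let s : String := s ++ ("22  " ++ PySem.List.pyGetD prestr 22 "" ++ "        return x                                                        \n")
  let s : String := s ++ ("23  " ++ PySem.List.pyGetD prestr 23 "" ++ "    end procedure                                                       \n")
  s ++ "                                                                             \n\n"

-- ===== PORT B =====
def pvRows : List (String × Option (Int × String)) :=
 [
  ("                                                                             ", none),
  ("", none),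
  ("       <--- Recursive FFT Algorithm --->                                       ", none),
  ("                                                                               ", none),
  (" 0  ", some ((0 : Int), "    procedure fft( x )                                                  ")),
  (" 1                                                                             ", none),
  (" 2  ", some ((2 : Int), "        n = size(x)                                                     ")),
  (" 3  ", some ((3 : Int), "        if n = 1 then                                                   ")),
  (" 4  ", some ((4 : Int), "            return x[ 0 ]                                               ")),
  (" 5                                                                             ", none),
  (" 6  ", some ((6 : Int), "        else                                                            ")),
  (" 7  ", some ((7 : Int), "            even = x[ ::2  ]                                            ")),
  (" 8  ", some ((8 : Int), "            odd = x[ 1::2 ]                                             ")),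
  (" 9                                                                             ", none),
  ("10  ", some ((10 : Int), "            x = fft( even )                   # FFT over even indices   ")),
  ("11  ", some ((11 : Int), "            x += fft( odd  )                  # FFT over odd  indices   ")),
  ("12                                                                             ", none),
  ("13  ", some ((13 : Int), "            T = exp( ( -2 * pi * 1j ) / n )   # Twiddle factor          ")),
  ("14  ", some ((14 : Int), "            for k1 = n // 2                                             ")),
  ("15  ", some ((15 : Int), "                xk = x[ k1 ]                                            ")),
  ("16  ", some ((16 : Int), "                k2 = k1 + n // 2                                        ")),
  ("17  ", some ((17 : Int), "                x[ k1 ] = xk + x[ k2 ] * T^k1                           ")),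
  ("18  ", some ((18 : Int), "                x[ k2 ] = xk - x[ k2 ] * T^k1                           ")),
  ("19  ", some ((19 : Int), "            end                                                         ")),
  ("20  ", some ((20 : Int), "        end                                                             ")),
  ("21                                                                             ", none),
  ("22  ", some ((22 : Int), "        return x                                                        ")),
  ("23  ", some ((23 : Int), "    end procedure                                                       ")),
  ("                                                                             ", none),
  ("", none),
  ("", none)
 ]

def algorithm_text_alt (line : List Int) : String :=
  let marked : PySem.Set Int := PySem.Set.ofList line
  PySem.Str.join "\n" (pvRows.map (fun r =>
    match r.2 with
    | none => r.1
    | some np => r.1 ++ (if PySem.Set.contains marked np.1 then "--->" else "    ") ++ np.2))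

-- ===== PRECONDITION & SPEC =====
-- Pre_ restricts to the natural domain of the display: pseudocode row numbers 0..24.
-- A raises IndexError for an entry i ≥ 25 or i < -25, and accepts -25 ≤ i < 0 only via
-- Python's negative-index wraparound, outside the natural domain.
def Pre_algorithm_text (line : List Int) : Prop := ∀ i ∈ line, 0 ≤ i ∧ i < 25
instance (line : List Int) : Decidable (Pre_algorithm_text line) := by unfold Pre_algorithm_text; infer_instance
def pvWitness_algorithm_text : List Int := [24]

def Spec_algorithm_text (line : List Int) (out : String) : Prop := out = algorithm_text_alt line
instance (line : List Int) (out : String) : Decidable (Spec_algorithm_text line out) := by unfold Spec_algorithm_text; infer_instance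

-- ===== CLAIM (what is proved, stated in full; the proofs are below) =====
def Claim_equal_algorithm_text : Prop := ∀ (line : List Int), Dom_algorithm_text line → Pre_algorithm_text line → Spec_algorithm_text line (algorithm_text line)

-- ===== LEMMAS AND PROOFS =====

-- the marker slot both programs agree on: '--->' iff the row number is requested
def pvMark (line : List Int) (k : Int) : String :=
  if k ∈ line then "--->" else "    "

lemma pv_join_cons (x y : String) (rest : List String) :
    PySem.Str.join "\n" (x :: y :: rest) = x ++ ("\n" ++ PySem.Str.join "\n" (y :: rest)) := by
  rw [← String.toList_inj]
  simp [PySem.Str.toList_join, PySem.Chars.join_cons_cons]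

lemma pv_join_single (x : String) : PySem.Str.join "\n" [x] = x := by
  rw [← String.toList_inj]
  simp [PySem.Str.toList_join, PySem.Chars.join_singleton]

-- the marker array after A's assignment loop, read at an in-range index
lemma pv_fold_get (line : List Int) : ∀ (p : List String),
    (∀ i ∈ line, 0 ≤ i ∧ i < 25) → p.length = 25 →
    ∀ k : Int, 0 ≤ k → k < 25 →
    PySem.List.pyGetD (line.foldl (fun p i => PySem.List.pySetD p i "--->") p) k "" =
      if k ∈ line then "--->" else PySem.List.pyGetD p k "" := by
  induction line with
  | nil => intro p _ _ k _ _; simp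
  | cons i tl ih =>
    intro p hpre hp k h0 h1
    have hi := hpre i (List.mem_cons_self ..)
    have htl : ∀ j ∈ tl, 0 ≤ j ∧ j < 25 := fun j hj => hpre j (List.mem_cons_of_mem _ hj)
    rw [List.foldl_cons,
        ih _ htl (by rw [PySem.List.length_pySetD]; exact hp) k h0 h1]
    have hi' : i = ((i.toNat : Nat) : Int) := by omega
    have hk' : k = ((k.toNat : Nat) : Int) := by omega
    have hset : PySem.List.pyGetD (PySem.List.pySetD p i "--->") k "" =
        if k.toNat = i.toNat then "--->" else PySem.List.pyGetD p k "" := by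
      rw [hi', hk', PySem.List.pyGetD_pySetD_natCast p i.toNat k.toNat _ _ (by omega)]
      simp only [Int.toNat_natCast]
      rfl
    rw [hset]
    by_cases hke : k = i
    · simp [hke, List.mem_cons]
    · have : ¬ (k.toNat = i.toNat) := by omega
      by_cases hkt : k ∈ tl <;> simp [List.mem_cons, hke, hkt, this]

-- ===== VERDICT (by name: the statement is the Claim_ definition above) =====
set_option maxHeartbeats 2000000 in
set_option maxRecDepth 16000 in
theorem algorithm_text_spec : Claim_equal_algorithm_text := by
  intro line _ hpre
  unfold Spec_algorithm_text algorithm_text algorithm_text_alt pvRows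
  have hm : ∀ k : Int, 0 ≤ k → k < 25 →
      PySem.List.pyGetD (line.foldl (fun p i => PySem.List.pySetD p i "--->")
        ((PySem.List.pyRange 0 25 1).map (fun _ => "    "))) k "" = pvMark line k := by
    intro k h0 h1
    rw [pv_fold_get line _ hpre (by decide) k h0 h1]
    have h2 : ((PySem.List.pyRange 0 25 1).map (fun _ => "    ")) = List.replicate 25 "    " := by decide
    rw [h2, PySem.List.pyGetD_eq_getElem _ _ h0 (by simpa using h1), List.getElem_replicate, pvMark]
  have hs : ∀ n : Int, (if PySem.Set.contains (PySem.Set.ofList line) n then "--->" else "    ") = pvMark line n := by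
    intro n
    by_cases h : n ∈ line <;> simp [h, pvMark]
  simp only [hm 0 (by norm_num) (by norm_num),
             hm 2 (by norm_num) (by norm_num),
             hm 3 (by norm_num) (by norm_num),
             hm 4 (by norm_num) (by norm_num),
             hm 6 (by norm_num) (by norm_num),
             hm 7 (by norm_num) (by norm_num),
             hm 8 (by norm_num) (by norm_num),
             hm 10 (by norm_num) (by norm_num),
             hm 11 (by norm_num) (by norm_num),
             hm 13 (by norm_num) (by norm_num),
             hm 14 (by norm_num) (by norm_num),
             hm 15 (by norm_num) (by norm_num),
             hm 16 (by norm_num) (by norm_num),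
             hm 17 (by norm_num) (by norm_num),
             hm 18 (by norm_num) (by norm_num),
             hm 19 (by norm_num) (by norm_num),
             hm 20 (by norm_num) (by norm_num),
             hm 22 (by norm_num) (by norm_num),
             hm 23 (by norm_num) (by norm_num),
             List.map_cons, List.map_nil, hs]
  have g0 : ∀ X : String, "                                                                             " ++ ("\n" ++ ("" ++ ("\n" ++ ("       <--- Recursive FFT Algorithm --->                                       " ++ ("\n" ++ ("                                                                               " ++ ("\n" ++ (" 0  " ++ (X))))))))) = "                                                                             \n\n" ++ ("       <--- Recursive FFT Algorithm --->                                       \n" ++ ("                                                                               \n" ++ (" 0  " ++ (X)))) := by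
    intro X; simp only [← String.append_assoc]; congr 1
  have g1 : ∀ X : String, "    procedure fft( x )                                                  " ++ ("\n" ++ (" 1                                                                             " ++ ("\n" ++ (" 2  " ++ (X))))) = "    procedure fft( x )                                                  \n" ++ (" 1                                                                             \n" ++ (" 2  " ++ (X))) := by
    intro X; simp only [← String.append_assoc]; congr 1
  have g2 : ∀ X : String, "        n = size(x)                                                     " ++ ("\n" ++ (" 3  " ++ (X))) = "        n = size(x)                                                     \n" ++ (" 3  " ++ (X)) := by
    intro X; simp only [← String.append_assoc]; congr 1
  have g3 : ∀ X : String, "        if n = 1 then                                                   " ++ ("\n" ++ (" 4  " ++ (X))) = "        if n = 1 then                                                   \n" ++ (" 4  " ++ (X)) := by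
    intro X; simp only [← String.append_assoc]; congr 1
  have g4 : ∀ X : String, "            return x[ 0 ]                                               " ++ ("\n" ++ (" 5                                                                             " ++ ("\n" ++ (" 6  " ++ (X))))) = "            return x[ 0 ]                                               \n" ++ (" 5                                                                             \n" ++ (" 6  " ++ (X))) := by
    intro X; simp only [← String.append_assoc]; congr 1
  have g5 : ∀ X : String, "        else                                                            " ++ ("\n" ++ (" 7  " ++ (X))) = "        else                                                            \n" ++ (" 7  " ++ (X)) := by
    intro X; simp only [← String.append_assoc]; congr 1
  have g6 : ∀ X : String, "            even = x[ ::2  ]                                            " ++ ("\n" ++ (" 8  " ++ (X))) = "            even = x[ ::2  ]                                            \n" ++ (" 8  " ++ (X)) := by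
    intro X; simp only [← String.append_assoc]; congr 1
  have g7 : ∀ X : String, "            odd = x[ 1::2 ]                                             " ++ ("\n" ++ (" 9                                                                             " ++ ("\n" ++ ("10  " ++ (X))))) = "            odd = x[ 1::2 ]                                             \n" ++ (" 9                                                                             \n" ++ ("10  " ++ (X))) := by
    intro X; simp only [← String.append_assoc]; congr 1
  have g8 : ∀ X : String, "            x = fft( even )                   # FFT over even indices   " ++ ("\n" ++ ("11  " ++ (X))) = "            x = fft( even )                   # FFT over even indices   \n" ++ ("11  " ++ (X)) := by
    intro X; simp only [← String.append_assoc]; congr 1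
  have g9 : ∀ X : String, "            x += fft( odd  )                  # FFT over odd  indices   " ++ ("\n" ++ ("12                                                                             " ++ ("\n" ++ ("13  " ++ (X))))) = "            x += fft( odd  )                  # FFT over odd  indices   \n" ++ ("12                                                                             \n" ++ ("13  " ++ (X))) := by
    intro X; simp only [← String.append_assoc]; congr 1
  have g10 : ∀ X : String, "            T = exp( ( -2 * pi * 1j ) / n )   # Twiddle factor          " ++ ("\n" ++ ("14  " ++ (X))) = "            T = exp( ( -2 * pi * 1j ) / n )   # Twiddle factor          \n" ++ ("14  " ++ (X)) := by
    intro X; simp only [← String.append_assoc]; congr 1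
  have g11 : ∀ X : String, "            for k1 = n // 2                                             " ++ ("\n" ++ ("15  " ++ (X))) = "            for k1 = n // 2                                             \n" ++ ("15  " ++ (X)) := by
    intro X; simp only [← String.append_assoc]; congr 1
  have g12 : ∀ X : String, "                xk = x[ k1 ]                                            " ++ ("\n" ++ ("16  " ++ (X))) = "                xk = x[ k1 ]                                            \n" ++ ("16  " ++ (X)) := by
    intro X; simp only [← String.append_assoc]; congr 1
  have g13 : ∀ X : String, "                k2 = k1 + n // 2                                        " ++ ("\n" ++ ("17  " ++ (X))) = "                k2 = k1 + n // 2                                        \n" ++ ("17  " ++ (X)) := by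
    intro X; simp only [← String.append_assoc]; congr 1
  have g14 : ∀ X : String, "                x[ k1 ] = xk + x[ k2 ] * T^k1                           " ++ ("\n" ++ ("18  " ++ (X))) = "                x[ k1 ] = xk + x[ k2 ] * T^k1                           \n" ++ ("18  " ++ (X)) := by
    intro X; simp only [← String.append_assoc]; congr 1
  have g15 : ∀ X : String, "                x[ k2 ] = xk - x[ k2 ] * T^k1                           " ++ ("\n" ++ ("19  " ++ (X))) = "                x[ k2 ] = xk - x[ k2 ] * T^k1                           \n" ++ ("19  " ++ (X)) := by
    intro X; simp only [← String.append_assoc]; congr 1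
  have g16 : ∀ X : String, "            end                                                         " ++ ("\n" ++ ("20  " ++ (X))) = "            end                                                         \n" ++ ("20  " ++ (X)) := by
    intro X; simp only [← String.append_assoc]; congr 1
  have g17 : ∀ X : String, "        end                                                             " ++ ("\n" ++ ("21                                                                             " ++ ("\n" ++ ("22  " ++ (X))))) = "        end                                                             \n" ++ ("21                                                                             \n" ++ ("22  " ++ (X))) := by
    intro X; simp only [← String.append_assoc]; congr 1
  have g18 : ∀ X : String, "        return x                                                        " ++ ("\n" ++ ("23  " ++ (X))) = "        return x                                                        \n" ++ ("23  " ++ (X)) := by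
    intro X; simp only [← String.append_assoc]; congr 1
  have g19 : "    end procedure                                                       " ++ ("\n" ++ ("                                                                             " ++ ("\n" ++ ("" ++ ("\n" ++ ("")))))) = "    end procedure                                                       \n" ++ ("                                                                             \n\n") := by decide
  simp only [pv_join_cons, pv_join_single]
  simp only [String.append_assoc]
  rw [g0, g1, g2, g3, g4, g5, g6, g7, g8, g9, g10, g11, g12, g13, g14, g15, g16, g17, g18, g19]
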